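-- pv_equiv track=rewrite | github.com/Vloer/advent_of_code | 2024/d14.py | get_pos
-- ===== SOURCE A (Python) =====
-- def get_pos(start, speed, grid_size, seconds) -> tuple[int, int]:
--     new_x, new_y = start
--     vx, vy = speed
--     max_x = grid_size[0] - 1
--     max_y = grid_size[1] - 1
--     for _ in range(seconds):
--         # p(11, 7, (new_x, new_y))
--         new_x, new_y = new_x + vx, new_y + vy
--         if new_x > max_x:
--             new_x = new_x - max_x - 1
--         elif new_x < 0:
--             new_x = max_x + new_x + 1
--         if new_y > max_y:
--             new_y = new_y - max_y - 1
--         elif new_y < 0: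
--             new_y = max_y + new_y + 1
--     return new_x, new_y
-- ===== SOURCE B (Python) =====
-- def get_pos(start, speed, grid_size, seconds) -> tuple[int, int]:
--     vx, vy = speed
--     max_x = grid_size[0] - 1
--     max_y = grid_size[1] - 1
--
--     def step(p):
--         x, y = p[0] + vx, p[1] + vy
--         if x > max_x:
--             x = x - max_x - 1
--         elif x < 0:
--             x = max_x + x + 1
--         if y > max_y:
--             y = y - max_y - 1
--         elif y < 0:
--             y = max_y + y + 1
--         return x, y
--
--     s = (start[0], start[1])
--     k = 0
--     while k < seconds:
--         s = step(s)
--         k += 1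
--         if s == (start[0], start[1]):
--             # orbit returned to the start: period k divides the motion, jump ahead
--             t = s
--             for _ in range(seconds % k):
--                 t = step(t)
--             return t
--     return s
-- ===== Notes on version B (the rewrite author's own statement) =====
-- stated objective: alternative
-- what changed: B replaces A's unconditional second-by-second simulation with cycle detection: it stops as soon as the orbit returns to the starting state after k steps and then replays only seconds mod k further steps.
import Mathlib
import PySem

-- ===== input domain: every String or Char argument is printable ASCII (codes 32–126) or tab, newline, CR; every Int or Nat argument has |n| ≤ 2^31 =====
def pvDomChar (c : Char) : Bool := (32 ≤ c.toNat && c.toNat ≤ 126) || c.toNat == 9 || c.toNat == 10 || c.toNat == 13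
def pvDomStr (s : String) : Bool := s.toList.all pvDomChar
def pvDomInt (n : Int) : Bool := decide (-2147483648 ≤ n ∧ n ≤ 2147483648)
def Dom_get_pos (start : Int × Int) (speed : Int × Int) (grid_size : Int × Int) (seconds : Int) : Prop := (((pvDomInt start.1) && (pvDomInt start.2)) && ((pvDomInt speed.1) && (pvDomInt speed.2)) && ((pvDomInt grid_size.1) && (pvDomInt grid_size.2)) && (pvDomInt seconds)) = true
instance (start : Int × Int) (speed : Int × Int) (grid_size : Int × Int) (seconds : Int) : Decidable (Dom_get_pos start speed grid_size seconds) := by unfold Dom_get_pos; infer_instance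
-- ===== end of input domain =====

-- B replaces A's unconditional second-by-second loop with cycle detection: it stops as
-- soon as the orbit returns to the starting state after k steps and then replays only
-- 'seconds mod k' further steps (an alternative algorithm; not measured faster here).

-- ===== PORT A =====
def get_pos (start : Int × Int) (speed : Int × Int) (grid_size : Int × Int) (seconds : Int) : Int × Int :=
  let max_x := grid_size.1 - 1
  let max_y := grid_size.2 - 1
  (PySem.List.pyRange 0 seconds 1).foldl
    (fun (p : Int × Int) _ =>
      let nx := p.1 + speed.1
      let ny := p.2 + speed.2
      let nx' := if nx > max_x then nx - max_x - 1 else if nx < 0 then max_x + nx + 1 else nx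
      let ny' := if ny > max_y then ny - max_y - 1 else if ny < 0 then max_y + ny + 1 else ny
      (nx', ny'))
    (start.1, start.2)

-- ===== PORT B =====
-- Source B's helper 'step'
def pvStep (speed grid_size : Int × Int) (p : Int × Int) : Int × Int :=
  let max_x := grid_size.1 - 1
  let max_y := grid_size.2 - 1
  let x := p.1 + speed.1
  let y := p.2 + speed.2
  let x' := if x > max_x then x - max_x - 1 else if x < 0 then max_x + x + 1 else x
  let y' := if y > max_y then y - max_y - 1 else if y < 0 then max_y + y + 1 else y
  (x', y')

-- Source B's replay loop 'for _ in range(seconds % k): t = step(t)'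
def pvReplay (speed grid_size : Int × Int) (t : Int × Int) : Nat → Int × Int
  | 0 => t
  | n + 1 => pvReplay speed grid_size (pvStep speed grid_size t) n

-- Source B's main while-loop: 'rem' is the number of iterations left, 'done' the count k taken so far
def pvLoop (speed grid_size s0 : Int × Int) (s : Int × Int) : Nat → Nat → Int × Int
  | 0, _ => s
  | r + 1, done =>
      let s' := pvStep speed grid_size s
      if s' = s0 then pvReplay speed grid_size s0 ((done + 1 + r) % (done + 1))
      else pvLoop speed grid_size s0 s' r (done + 1)

def get_pos_alt (start : Int × Int) (speed : Int × Int) (grid_size : Int × Int) (seconds : Int) : Int × Int :=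
  pvLoop speed grid_size (start.1, start.2) (start.1, start.2) seconds.toNat 0

-- ===== PRECONDITION & SPEC =====
def Spec_get_pos (start : Int × Int) (speed : Int × Int) (grid_size : Int × Int) (seconds : Int) (out : Int × Int) : Prop := out = get_pos_alt start speed grid_size seconds
instance (start : Int × Int) (speed : Int × Int) (grid_size : Int × Int) (seconds : Int) (out : Int × Int) : Decidable (Spec_get_pos start speed grid_size seconds out) := by unfold Spec_get_pos; infer_instance

-- ===== CLAIM (what is proved, stated in full; the proofs are below) =====
def Claim_equal_get_pos : Prop := ∀ (start : Int × Int) (speed : Int × Int) (grid_size : Int × Int) (seconds : Int), Dom_get_pos start speed grid_size seconds → Spec_get_pos start speed grid_size seconds (get_pos start speed grid_size seconds)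

-- ===== LEMMAS AND PROOFS =====

-- A's fold ignores the range element, so it is iteration of pvStep
theorem pv_foldl_ignore_iterate (f : Int × Int → Int × Int) :
    ∀ (l : List Int) (s : Int × Int), l.foldl (fun p _ => f p) s = f^[l.length] s := by
  intro l
  induction l with
  | nil => intro s; simp
  | cons a t ih =>
      intro s
      simp [List.foldl, ih, Function.iterate_succ_apply]

theorem pv_iterate_mul (f : Int × Int → Int × Int) (x : Int × Int) (p : Nat)
    (hp : f^[p] x = x) : ∀ q, f^[p * q] x = x := by
  intro q
  induction q with
  | zero => simp
  | succ n ih =>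
      have : p * (n + 1) = p * n + p := by ring
      rw [this, Function.iterate_add_apply, hp, ih]

theorem pv_iterate_mod (f : Int × Int → Int × Int) (x : Int × Int) (p : Nat)
    (hp : f^[p] x = x) (n : Nat) : f^[n] x = f^[n % p] x := by
  conv_lhs => rw [← Nat.div_add_mod n p]
  rw [Nat.add_comm, Function.iterate_add_apply, pv_iterate_mul f x p hp]

theorem pvReplay_iterate (speed grid_size : Int × Int) :
    ∀ (n : Nat) (t : Int × Int), pvReplay speed grid_size t n = (pvStep speed grid_size)^[n] t := by
  intro n
  induction n with
  | zero => intro t; rfl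
  | succ m ih => intro t; simp [pvReplay, ih, Function.iterate_succ_apply]

theorem pvLoop_iterate (speed grid_size s0 : Int × Int) :
    ∀ (rem done : Nat),
      pvLoop speed grid_size s0 ((pvStep speed grid_size)^[done] s0) rem done
        = (pvStep speed grid_size)^[done + rem] s0 := by
  intro rem
  induction rem with
  | zero => intro done; simp [pvLoop]
  | succ r ih =>
      intro done
      rw [pvLoop]
      by_cases h : pvStep speed grid_size ((pvStep speed grid_size)^[done] s0) = s0
      · rw [if_pos h]
        have hper : (pvStep speed grid_size)^[done + 1] s0 = s0 := by
          rw [Function.iterate_succ_apply']; exact h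
        rw [pvReplay_iterate]
        rw [← pv_iterate_mod (pvStep speed grid_size) s0 (done + 1) hper (done + 1 + r)]
        congr 1
        omega
      · rw [if_neg h]
        have hs : pvStep speed grid_size ((pvStep speed grid_size)^[done] s0)
            = (pvStep speed grid_size)^[done + 1] s0 := by
          rw [Function.iterate_succ_apply']
        rw [hs, ih (done + 1)]
        congr 1
        omega

theorem get_pos_eq_iterate (start speed grid_size : Int × Int) (seconds : Int) :
    get_pos start speed grid_size seconds
      = (pvStep speed grid_size)^[seconds.toNat] (start.1, start.2) := by
  show (PySem.List.pyRange 0 seconds 1).foldl (fun p _ => pvStep speed grid_size p) (start.1, start.2)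
      = (pvStep speed grid_size)^[seconds.toNat] (start.1, start.2)
  rw [pv_foldl_ignore_iterate (pvStep speed grid_size)]
  rw [PySem.List.length_pyRange_one]
  norm_num

-- ===== VERDICT (by name: the statement is the Claim_ definition above) =====
theorem get_pos_spec : Claim_equal_get_pos := by
  intro start speed grid_size seconds _
  unfold Spec_get_pos
  rw [get_pos_eq_iterate]
  unfold get_pos_alt
  have := pvLoop_iterate speed grid_size (start.1, start.2) seconds.toNat 0
  simp at this
  rw [← this]
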